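-- pv_equiv track=rewrite | github.com/AmazingCow-Tools/License_Header_Checker | license_header_checker.py | line_for_chars_count
-- ===== SOURCE A (Python) =====
-- def line_for_chars_count(chars_count, lines):
--     count = 0;
--     for line_index in range(0, len(lines)):
--         curr_line = lines[line_index];
--         count    += (len(curr_line) + 1); ##+1 is for new line.
--
--         if(count == chars_count):
--             return line_index;
--
--     return -1;
-- ===== SOURCE B (Python) =====
-- def line_for_chars_count(chars_count, lines):
--     # Build the full prefix-sum table of character counts, then look the
--     # target up in it (prefix sums are strictly increasing, so .index is
--     # unambiguous).
--     cums = []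
--     total = 0
--     for line in lines:
--         total += len(line) + 1  # +1 for the newline
--         cums.append(total)
--     try:
--         return cums.index(chars_count)
--     except ValueError:
--         return -1
-- ===== Notes on version B (the rewrite author's own statement) =====
-- stated objective: idiomatic
-- what changed: A's single early-exit scan with a running counter is replaced by a two-pass decomposition: first materialize the full list of cumulative character counts, then locate the target with list.index (catching ValueError as -1), relying on the prefix sums being strictly increasing.
import Mathlib
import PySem

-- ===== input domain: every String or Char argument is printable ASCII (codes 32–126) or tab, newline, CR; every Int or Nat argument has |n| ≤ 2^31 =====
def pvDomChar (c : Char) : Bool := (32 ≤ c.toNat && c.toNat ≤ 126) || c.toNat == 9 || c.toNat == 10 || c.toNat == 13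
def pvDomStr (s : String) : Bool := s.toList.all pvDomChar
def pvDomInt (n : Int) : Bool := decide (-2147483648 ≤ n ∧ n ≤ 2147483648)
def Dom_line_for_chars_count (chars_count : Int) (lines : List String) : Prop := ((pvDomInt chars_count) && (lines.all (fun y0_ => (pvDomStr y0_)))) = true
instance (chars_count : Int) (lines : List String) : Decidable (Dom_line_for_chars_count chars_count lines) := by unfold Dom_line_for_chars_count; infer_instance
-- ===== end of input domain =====

-- ===== PORT A =====
-- B replaces A's early-exit running-counter scan by a prefix-sum table plus list.index lookup (idiomatic two-pass decomposition; return value only).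
-- A's loop: running count, return the index as soon as count == chars_count, else -1.
def pvALoop (chars_count : Int) (count : Int) (line_index : Int) : List String → Int
  | [] => -1
  | curr_line :: rest =>
    let count' := count + ((curr_line.length : Int) + 1)
    if count' = chars_count then line_index
    else pvALoop chars_count count' (line_index + 1) rest

def line_for_chars_count (chars_count : Int) (lines : List String) : Int :=
  pvALoop chars_count 0 0 lines

-- ===== PORT B =====
-- cums: the list of cumulative character counts (len(line)+1 each), as built by Source B's first loop.
def pvCums (total : Int) : List String → List Int
  | [] => []
  | line :: rest =>
    let total' := total + ((line.length : Int) + 1)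
    total' :: pvCums total' rest

def line_for_chars_count_alt (chars_count : Int) (lines : List String) : Int :=
  match PySem.List.index? (pvCums 0 lines) chars_count with
  | some i => (i : Int)
  | none => -1

-- ===== PRECONDITION & SPEC =====
def Spec_line_for_chars_count (chars_count : Int) (lines : List String) (out : Int) : Prop := out = line_for_chars_count_alt chars_count lines
instance (chars_count : Int) (lines : List String) (out : Int) : Decidable (Spec_line_for_chars_count chars_count lines out) := by unfold Spec_line_for_chars_count; infer_instance

-- ===== CLAIM (what is proved, stated in full; the proofs are below) =====
def Claim_equal_line_for_chars_count : Prop := ∀ (chars_count : Int) (lines : List String), Dom_line_for_chars_count chars_count lines → Spec_line_for_chars_count chars_count lines (line_for_chars_count chars_count lines)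

-- ===== LEMMAS AND PROOFS =====

theorem pvALoop_eq_index (chars_count : Int) (ls : List String) :
    ∀ (count i : Int),
      pvALoop chars_count count i ls =
        match PySem.List.index? (pvCums count ls) chars_count with
        | some k => i + (k : Int)
        | none => -1 := by
  induction ls with
  | nil => intro count i; simp [pvALoop, pvCums, PySem.List.index?]
  | cons l rest ih =>
    intro count i
    simp only [pvALoop, pvCums]
    by_cases h : count + ((l.length : Int) + 1) = chars_count
    · rw [if_pos h, h, PySem.List.index?_cons_self]; simp
    · rw [if_neg h, PySem.List.index?_cons_of_ne _ h, ih]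
      cases PySem.List.index? (pvCums (count + ((l.length : Int) + 1)) rest) chars_count with
      | none => simp
      | some k => simp; ring

-- ===== VERDICT (by name: the statement is the Claim_ definition above) =====
theorem line_for_chars_count_spec : Claim_equal_line_for_chars_count := by
  intro chars_count lines _
  unfold Spec_line_for_chars_count line_for_chars_count line_for_chars_count_alt
  rw [pvALoop_eq_index]
  cases PySem.List.index? (pvCums 0 lines) chars_count with
  | none => rfl
  | some k => simp
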